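-- pv_equiv track=rewrite | github.com/harshil0404/pythonAlgos | booksPages_maximini.py | absSum
-- ===== SOURCE A (Python) =====
-- def absSum(arr):
--     maxi=[]
--     for a in range(len(arr)-1):
--         sum1 = sum2 = 0
--         for j in range(0,a+1):
--             sum1 = sum1 + arr[j]
--         for k in range(a+1,len(arr)):
--             sum2 = sum2 + arr[k]
--         maxi.append(max(sum1,sum2))
--     return min(maxi)
-- ===== SOURCE B (Python) =====
-- def absSum(arr):
--     # One pass: keep a running prefix sum; the suffix sum is total - prefix.
--     total = sum(arr)
--     pref = arr[0]
--     best = max(pref, total - pref)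
--     for x in arr[1:-1]:
--         pref += x
--         m = max(pref, total - pref)
--         if m < best:
--             best = m
--     return best
-- ===== Notes on version B (the rewrite author's own statement) =====
-- stated objective: faster
-- what changed: Replaces the quadratic re-summation of prefix and suffix at every split by a single pass that maintains a running prefix sum and derives the suffix sum as total - prefix.
import Mathlib
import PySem

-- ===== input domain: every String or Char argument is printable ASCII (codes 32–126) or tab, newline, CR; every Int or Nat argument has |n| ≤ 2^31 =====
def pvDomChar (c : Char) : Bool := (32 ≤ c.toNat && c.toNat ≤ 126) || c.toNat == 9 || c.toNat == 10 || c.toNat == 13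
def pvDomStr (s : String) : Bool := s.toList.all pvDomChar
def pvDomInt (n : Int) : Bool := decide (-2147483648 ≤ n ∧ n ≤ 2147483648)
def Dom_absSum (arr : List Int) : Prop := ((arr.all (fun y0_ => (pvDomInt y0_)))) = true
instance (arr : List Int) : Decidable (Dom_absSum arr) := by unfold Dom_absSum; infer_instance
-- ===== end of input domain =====

-- B replaces A's re-summation of prefix and suffix at every split point by a single pass with a
-- running prefix sum and a precomputed total (objective: faster).

-- ===== PORT A =====
def absSum (arr : List Int) : Int :=
  let maxi : List Int :=
    (PySem.List.pyRange 0 ((arr.length : Int) - 1) 1).foldl (fun maxi a =>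
      let sum1 := (PySem.List.pyRange 0 (a + 1) 1).foldl
        (fun s j => s + PySem.List.pyGetD arr j 0) 0
      let sum2 := (PySem.List.pyRange (a + 1) (arr.length : Int) 1).foldl
        (fun s k => s + PySem.List.pyGetD arr k 0) 0
      maxi ++ [max sum1 sum2]) []
  (PySem.List.min? maxi (fun x => x)).getD 0   -- min(maxi); Pre_ rules out the empty case

-- ===== PORT B =====
def absSum_alt (arr : List Int) : Int :=
  let total := arr.sum
  let pref := PySem.List.pyGetD arr 0 0        -- arr[0]; Pre_ rules out the empty case
  let best := max pref (total - pref)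
  let st := (PySem.List.slice arr (some 1) (some (-1))).foldl
    (fun (st : Int × Int) x =>
      let pr := st.2 + x
      let m := max pr (total - pr)
      (if m < st.1 then m else st.1, pr)) (best, pref)
  st.1

-- ===== PRECONDITION & SPEC =====
-- Python A raises (ValueError: min of empty sequence) when len(arr) < 2; those inputs are excluded.
def Pre_absSum (arr : List Int) : Prop := 2 ≤ arr.length
instance (arr : List Int) : Decidable (Pre_absSum arr) := by unfold Pre_absSum; infer_instance
def pvWitness_absSum : List Int := ([1, 2, 3] : List Int)

def Spec_absSum (arr : List Int) (out : Int) : Prop := out = absSum_alt arr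
instance (arr : List Int) (out : Int) : Decidable (Spec_absSum arr out) := by unfold Spec_absSum; infer_instance

-- ===== CLAIM (what is proved, stated in full; the proofs are below) =====
def Claim_equal_absSum : Prop := ∀ (arr : List Int), Dom_absSum arr → Pre_absSum arr → Spec_absSum arr (absSum arr)

-- ===== LEMMAS AND PROOFS =====

-- the split-point candidate: max(prefix sum of the first m, suffix sum of the rest)
def pvG (arr : List Int) (m : Nat) : Int :=
  max ((arr.take m).sum) (arr.sum - (arr.take m).sum)

-- A's first inner loop computes the prefix sum
theorem pv_prefix (xs : List Int) (m : Nat) (hm : m ≤ xs.length) :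
    (PySem.List.pyRange 0 (m : Int) 1).foldl (fun s j => s + PySem.List.pyGetD xs j 0) 0
      = (xs.take m).sum := by
  induction m with
  | zero => simp [PySem.List.pyRange_one_eq_nil]
  | succ k ih =>
    have hk : k ≤ xs.length := Nat.le_of_succ_le hm
    have hcast : ((k + 1 : Nat) : Int) = (k : Int) + 1 := by push_cast; ring
    rw [hcast, PySem.List.pyRange_one_succ_right (Int.natCast_nonneg k), List.foldl_append, ih hk]
    have hlt : k < xs.length := hm
    simp only [List.foldl_cons, List.foldl_nil]
    rw [PySem.List.pyGetD_natCast, List.getD_eq_getElem _ _ hlt, List.sum_take_succ _ _ hlt]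

theorem pv_foldl_sum (l : List Int) : l.foldl (fun s x => s + x) 0 = l.sum := by
  simpa using PySem.List.foldl_add (l := l) (g := fun x => x) (a := 0)

-- A's second inner loop computes the suffix sum = total - prefix sum
theorem pv_suffix (xs : List Int) (m : Nat) :
    (PySem.List.pyRange ((m : Nat) : Int) ((xs.length : Nat) : Int) 1).foldl
        (fun s k => s + PySem.List.pyGetD xs k 0) 0
      = xs.sum - (xs.take m).sum := by
  rw [PySem.List.foldl_pyRange_pyGetD' xs 0 (fun s x => s + x) 0 (Int.natCast_nonneg m)]
  rw [Int.toNat_natCast, pv_foldl_sum]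
  have hsum : (xs.take m).sum + (xs.drop m).sum = xs.sum := by
    rw [← List.sum_append, List.take_append_drop]
  omega

-- A = running min over the candidates pvG 1, pvG 2, …, pvG (n-1)
theorem pv_A_eq (arr : List Int) (h : 2 ≤ arr.length) :
    absSum arr
      = (List.range (arr.length - 2)).foldl (fun acc k => min acc (pvG arr (k + 2))) (pvG arr 1) := by
  show ((PySem.List.min? _ _).getD 0) = _
  rw [PySem.List.foldl_append_singleton_eq_map]
  have hc : ((arr.length : Int) - 1) = ((arr.length - 1 : Nat) : Int) := by
    omega
  rw [hc, PySem.List.pyRange_zero_natCast, List.map_map]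
  have hmap : (List.range (arr.length - 1)).map
        ((fun (a : Int) =>
            max ((PySem.List.pyRange 0 (a + 1) 1).foldl (fun s j => s + PySem.List.pyGetD arr j 0) 0)
                ((PySem.List.pyRange (a + 1) (arr.length : Int) 1).foldl (fun s k => s + PySem.List.pyGetD arr k 0) 0))
          ∘ (fun (k : Nat) => (k : Int)))
      = (List.range (arr.length - 1)).map (fun k => pvG arr (k + 1)) := by
    apply List.map_congr_left
    intro k hk
    rw [List.mem_range] at hk
    have hk1 : k + 1 ≤ arr.length := by omega
    have hcast : ((k : Int) + 1) = ((k + 1 : Nat) : Int) := by push_cast; ring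
    simp only [Function.comp_apply]
    rw [hcast, pv_prefix arr (k + 1) hk1, pv_suffix arr (k + 1)]
    rfl
  rw [hmap]
  have hn : arr.length - 1 = (arr.length - 2) + 1 := by omega
  rw [hn, List.range_succ_eq_map, List.map_cons, List.map_map, List.nil_append]
  rw [PySem.List.min?_id_cons, Option.getD_some, List.foldl_map]
  rfl

-- B's loop invariant: the fold carries (running min of candidates, running prefix sum)
theorem pv_stepFold (t : Int) (ys : List Int) : ∀ (b p : Int),
    ys.foldl (fun (st : Int × Int) x =>
        (if max (st.2 + x) (t - (st.2 + x)) < st.1 then max (st.2 + x) (t - (st.2 + x)) else st.1,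
         st.2 + x)) (b, p)
      = ((List.range ys.length).foldl
          (fun acc k => min acc (max (p + (ys.take (k + 1)).sum) (t - (p + (ys.take (k + 1)).sum)))) b,
         p + ys.sum) := by
  induction ys with
  | nil => intro b p; simp
  | cons y ys ih =>
    intro b p
    rw [List.foldl_cons, ih]
    have hb : (if max (p + y) (t - (p + y)) < b then max (p + y) (t - (p + y)) else b)
        = min b (max (p + y) (t - (p + y))) := by
      split <;> omega
    rw [hb]
    have hlen : (y :: ys).length = ys.length + 1 := rfl
    rw [hlen, List.range_succ_eq_map, List.foldl_cons, List.foldl_map]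
    dsimp only
    rw [Prod.mk.injEq]
    constructor
    · have h0 : (p + ((y :: ys).take (0 + 1)).sum) = p + y := by simp
      rw [h0]
      have hf : (fun (acc : Int) (k : Nat) =>
            min acc (max ((p + y) + (ys.take (k + 1)).sum) (t - ((p + y) + (ys.take (k + 1)).sum))))
          = (fun (acc : Int) (k : Nat) =>
            min acc (max (p + ((y :: ys).take (k.succ + 1)).sum) (t - (p + ((y :: ys).take (k.succ + 1)).sum)))) := by
        funext acc k
        have hts : ((y :: ys).take (k.succ + 1)).sum = y + (ys.take (k + 1)).sum := by
          simp [List.take_succ_cons]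
        rw [hts]; ring_nf
      rw [hf]
    · simp only [List.sum_cons]; ring

-- B = the same running min
theorem pv_B_eq (arr : List Int) (h : 2 ≤ arr.length) :
    absSum_alt arr
      = (List.range (arr.length - 2)).foldl (fun acc k => min acc (pvG arr (k + 2))) (pvG arr 1) := by
  have hslice : PySem.List.slice arr (some 1) (some (-1)) = (arr.drop 1).take (arr.length - 2) := by
    simp [PySem.List.slice]
    rw [show min 1 arr.length = 1 from by omega, List.drop_one, Nat.sub_sub]
  have hp : PySem.List.pyGetD arr 0 0 = (arr.take 1).sum := by
    cases arr with
    | nil => simp at h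
    | cons a l => simp [PySem.List.pyGetD_zero]
  simp only [absSum_alt]
  rw [hslice, hp, pv_stepFold]
  dsimp only
  have hyslen : ((arr.drop 1).take (arr.length - 2)).length = arr.length - 2 := by
    simp; omega
  rw [hyslen]
  have hinit : max ((arr.take 1).sum) (arr.sum - (arr.take 1).sum) = pvG arr 1 := rfl
  rw [hinit]
  apply PySem.List.foldl_congr_mem
  intro acc k hk
  rw [List.mem_range] at hk
  have htt : ((arr.drop 1).take (arr.length - 2)).take (k + 1) = (arr.drop 1).take (k + 1) := by
    rw [List.take_take]
    congr 1
    omega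
  have hsplit : arr.take (k + 2) = arr.take 1 ++ (arr.drop 1).take (k + 1) := by
    have h12 : k + 2 = 1 + (k + 1) := by omega
    rw [h12, List.take_add]
  have hsum : (arr.take 1).sum + ((arr.drop 1).take (k + 1)).sum = (arr.take (k + 2)).sum := by
    rw [hsplit, List.sum_append]
  rw [htt, hsum]
  rfl

-- ===== VERDICT =====
theorem absSum_spec : Claim_equal_absSum := by
  intro arr _ hpre
  unfold Pre_absSum at hpre
  unfold Spec_absSum
  rw [pv_A_eq arr hpre, pv_B_eq arr hpre]
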